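-- pv_equiv track=rewrite | github.com/SixSense-CodingTest/coding-test | Class-3/Taeseong/Z.py | rec
-- ===== SOURCE A (Python) =====
-- def rec(N, y, x, T):
--     if N == 1:
--         return T + 2 * y + x
--
--     size = 2 ** (N - 1)
--     quarter_area = size * size
--
--     if y < size and x < size:  # 1
--         return rec(N - 1, y, x, T)
--     elif y < size and x >= size:  # 2
--         return rec(N - 1, y , x - size, T + quarter_area)
--     elif y >= size and x < size:  # 3
--         return rec(N - 1, y - size, x , T + 2 * quarter_area)
--     else:  # 4
--         return rec(N - 1, y - size, x - size, T + 3 * quarter_area)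
-- ===== SOURCE B (Python) =====
-- def rec(N, y, x, T):
--     # Iterative: peel quadrant levels in a flat while-loop instead of tail recursion.
--     while N > 1:
--         size = 2 ** (N - 1)
--         quarter_area = size * size
--         T += (2 * (y >= size) + (x >= size)) * quarter_area
--         if y >= size:
--             y -= size
--         if x >= size:
--             x -= size
--         N -= 1
--     return T + 2 * y + x
-- ===== Notes on version B (the rewrite author's own statement) =====
-- stated objective: simpler
-- what changed: Replaced the four-branch tail recursion with a flat while-loop that selects the quadrant arithmetically ((2*(y>=size)+(x>=size))*size*size) and subtracts size from the residual coordinates in place.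
import Mathlib
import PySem

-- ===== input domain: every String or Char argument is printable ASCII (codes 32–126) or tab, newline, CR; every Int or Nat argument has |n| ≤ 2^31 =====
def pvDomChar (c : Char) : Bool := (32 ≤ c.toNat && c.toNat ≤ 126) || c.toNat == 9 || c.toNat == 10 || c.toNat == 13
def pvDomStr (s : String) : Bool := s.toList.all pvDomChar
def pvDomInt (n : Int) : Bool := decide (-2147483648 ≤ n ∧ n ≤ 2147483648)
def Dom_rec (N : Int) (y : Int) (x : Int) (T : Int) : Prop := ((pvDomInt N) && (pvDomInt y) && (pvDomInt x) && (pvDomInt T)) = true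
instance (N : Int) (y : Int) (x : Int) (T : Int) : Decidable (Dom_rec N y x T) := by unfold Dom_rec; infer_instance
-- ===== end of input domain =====

-- B replaces A's four-branch tail recursion by a flat while-loop that picks the quadrant
-- arithmetically; objective: simpler. Proved equal for N ≥ 1 (A's recursion bottoms out only there).


-- ===== PORT A =====
-- Transliteration of A's recursion, driven by fuel (N-1).toNat so it is structural: for N ≥ 1
-- the fuel is always sufficient and never consulted except as the totality guard for N < 1,
-- where the Python recursion never terminates (RecursionError); such inputs are outside Pre_rec.
def recGo (fuel : Nat) (N : Int) (y : Int) (x : Int) (T : Int) : Int :=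
  match fuel with
  | 0 => T + 2 * y + x  -- fuel guard: reached exactly at N = 1 (the base case) or at N < 1 (outside Pre_rec)
  | fuel + 1 =>
    if N = 1 then T + 2 * y + x
    else
      let size : Int := 2 ^ (N - 1).toNat
      let quarter_area := size * size
      if y < size ∧ x < size then recGo fuel (N - 1) y x T
      else if y < size ∧ x ≥ size then recGo fuel (N - 1) y (x - size) (T + quarter_area)
      else if y ≥ size ∧ x < size then recGo fuel (N - 1) (y - size) x (T + 2 * quarter_area)
      else recGo fuel (N - 1) (y - size) (x - size) (T + 3 * quarter_area)

def rec (N : Int) (y : Int) (x : Int) (T : Int) : Int :=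
  recGo (N - 1).toNat N y x T

-- ===== PORT B =====
-- The while-loop of Source B: state (N, y, x, T), the same fuel (N-1).toNat counts the iterations.
def recAltLoop (fuel : Nat) (N : Int) (y : Int) (x : Int) (T : Int) : Int :=
  match fuel with
  | 0 => T + 2 * y + x  -- loop finished (N ≤ 1)
  | fuel + 1 =>
    if N > 1 then
      let size : Int := 2 ^ (N - 1).toNat
      let quarter_area := size * size
      recAltLoop fuel (N - 1)
        (if y ≥ size then y - size else y)
        (if x ≥ size then x - size else x)
        (T + (2 * (if y ≥ size then (1 : Int) else 0) + (if x ≥ size then (1 : Int) else 0)) * quarter_area)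
    else T + 2 * y + x

def rec_alt (N : Int) (y : Int) (x : Int) (T : Int) : Int :=
  recAltLoop (N - 1).toNat N y x T

-- ===== PRECONDITION & SPEC =====
-- Pre_rec excludes exactly N < 1, where the Python A recurses without a base case (RecursionError).
def Pre_rec (N : Int) (y : Int) (x : Int) (T : Int) : Prop := 1 ≤ N
instance (N : Int) (y : Int) (x : Int) (T : Int) : Decidable (Pre_rec N y x T) := by unfold Pre_rec; infer_instance
def pvWitness_rec : Int × Int × Int × Int := (3, 5, 2, 0)

def Spec_rec (N : Int) (y : Int) (x : Int) (T : Int) (out : Int) : Prop := out = rec_alt N y x T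
instance (N : Int) (y : Int) (x : Int) (T : Int) (out : Int) : Decidable (Spec_rec N y x T out) := by unfold Spec_rec; infer_instance

-- ===== CLAIM (what is proved, stated in full; the proofs are below) =====
def Claim_equal_rec : Prop := ∀ (N : Int) (y : Int) (x : Int) (T : Int), Dom_rec N y x T → Pre_rec N y x T → Spec_rec N y x T (rec N y x T)

-- ===== LEMMAS AND PROOFS =====

theorem rec_eq_loop (n : Nat) : ∀ (y x T : Int), recGo n ((n : Int) + 1) y x T = recAltLoop n ((n : Int) + 1) y x T := by
  induction n with
  | zero => intro y x T; rfl
  | succ n ih =>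
    intro y x T
    rw [recGo, recAltLoop]
    push_cast
    have h1 : ¬ ((n : Int) + 1 + 1 = 1) := by omega
    have h3 : ((n : Int) + 1 + 1 > 1) := by omega
    have harg : ((n : Int) + 1 + 1 - 1) = (n : Int) + 1 := by ring
    simp only [h1, h3, if_true, if_false, harg]
    have hsz : (((n : Int) + 1).toNat) = n + 1 := by omega
    rw [hsz]
    set size : Int := 2 ^ (n + 1) with hs
    by_cases hy : y < size <;> by_cases hx : x < size
    · have hy' : ¬ y ≥ size := by omega
      have hx' : ¬ x ≥ size := by omega
      simp only [hy, hx, hy', hx', and_self, if_true, if_false]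
      rw [ih]; ring_nf
    · have hx2 : x ≥ size := by omega
      have hy' : ¬ y ≥ size := by omega
      simp only [hy, hx, hx2, hy', and_true, true_and, and_false, false_and, if_true, if_false]
      rw [ih]; ring_nf
    · have hy2 : y ≥ size := by omega
      have hy' : ¬ y < size := by omega
      have hx' : ¬ x ≥ size := by omega
      simp only [hy2, hx, hy', hx', and_true, true_and, and_false, false_and, if_true, if_false]
      rw [ih]; ring_nf
    · have hy2 : y ≥ size := by omega
      have hx2 : x ≥ size := by omega
      have hy' : ¬ y < size := by omega
      have hx' : ¬ x < size := by omega
      simp only [hy2, hx2, hy', hx', and_true, true_and, and_false, false_and, if_true, if_false]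
      rw [ih]; ring_nf

-- ===== VERDICT (by name: the statement is the Claim_ definition above) =====
theorem rec_spec : Claim_equal_rec := by
  intro N y x T _ hpre
  unfold Spec_rec rec rec_alt
  have hN : N = (((N - 1).toNat : Int)) + 1 := by
    unfold Pre_rec at hpre; omega
  rw [hN]
  have hfix : ((((N - 1).toNat : Int)) + 1 - 1).toNat = (N - 1).toNat := by omega
  rw [hfix, rec_eq_loop]
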